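-- pv_equiv track=rewrite | github.com/phuc-tr/agentic-data-qa | src/coverage.py | build_mappings
-- ===== SOURCE A (Python) =====
-- from collections import defaultdict
-- from typing import Dict, List, Tuple
--
-- def build_mappings(proposal_id_to_rule: Dict[str, str], proposal_ids: set, existing_results: List[Dict]):
--     """Return (rule->existing_ids, unmapped_existing_ids, proposal_only_existing).
--
--     Only needs proposal id mappings and the existing results list.
--     """
--     rule_to_existing_ids = defaultdict(list)
--     unmapped_existing_ids = []
--     proposal_only_existing = []
--
--     for e in existing_results:
--         cid = e.get("check_id")
--         if not cid:
--             continue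
--         if cid in proposal_ids:
--             mapped_rule = proposal_id_to_rule.get(cid)
--             if mapped_rule:
--                 rule_to_existing_ids[mapped_rule].append(cid)
--             else:
--                 proposal_only_existing.append(cid)
--         else:
--             unmapped_existing_ids.append(cid)
--
--     return rule_to_existing_ids, unmapped_existing_ids, proposal_only_existing
-- ===== SOURCE B (Python) =====
-- from collections import defaultdict
--
-- def build_mappings(proposal_id_to_rule, proposal_ids, existing_results):
--     """Partition by filtered passes: collect truthy check_ids once, then derive
--     each of the three outputs by its own filter/grouping pass."""
--     cids = [c for c in (e.get("check_id") for e in existing_results) if c]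
--     unmapped_existing_ids = [c for c in cids if c not in proposal_ids]
--     in_proposals = [c for c in cids if c in proposal_ids]
--     proposal_only_existing = [c for c in in_proposals if not proposal_id_to_rule.get(c)]
--     rule_to_existing_ids = defaultdict(list)
--     for rule, c in ((proposal_id_to_rule[c], c) for c in in_proposals if proposal_id_to_rule.get(c)):
--         rule_to_existing_ids[rule].append(c)
--     return rule_to_existing_ids, unmapped_existing_ids, proposal_only_existing
-- ===== Notes on version B (the rewrite author's own statement) =====
-- stated objective: alternative
-- what changed: Replaces A's single branching loop carrying three accumulators with independent filtered passes: collect the truthy check_ids once, derive unmapped and proposal-only lists by their own filters, and build the rule->ids grouping in a separate pass over precomputed (rule, cid) pairs.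
import Mathlib
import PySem

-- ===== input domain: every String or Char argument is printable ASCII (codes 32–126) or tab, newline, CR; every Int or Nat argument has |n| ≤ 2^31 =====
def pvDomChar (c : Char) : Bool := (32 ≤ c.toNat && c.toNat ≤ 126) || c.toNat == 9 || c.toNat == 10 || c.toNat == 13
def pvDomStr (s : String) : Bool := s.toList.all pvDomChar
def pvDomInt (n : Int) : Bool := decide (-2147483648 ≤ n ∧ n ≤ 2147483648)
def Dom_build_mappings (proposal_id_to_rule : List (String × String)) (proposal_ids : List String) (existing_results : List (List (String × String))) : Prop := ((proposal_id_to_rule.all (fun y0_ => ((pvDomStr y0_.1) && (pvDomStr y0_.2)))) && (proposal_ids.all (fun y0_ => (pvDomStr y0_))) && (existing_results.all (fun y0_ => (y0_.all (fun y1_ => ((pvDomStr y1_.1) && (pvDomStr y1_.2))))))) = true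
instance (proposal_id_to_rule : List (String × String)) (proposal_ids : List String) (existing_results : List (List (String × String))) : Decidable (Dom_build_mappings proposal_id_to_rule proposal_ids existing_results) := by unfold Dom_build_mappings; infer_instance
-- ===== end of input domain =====

-- B replaces A's single branching loop by independent filtered passes (collect truthy
-- check_ids once, then filter each output and group in its own pass); objective: alternative
-- decomposition, same asymptotic cost. The dict result is compared as its items list.

-- ===== PORT A =====
-- A's single loop carrying the three accumulators (defaultdict, unmapped, proposal_only).
def buildStepA (prd : PySem.Dict String String) (proposal_ids : List String)
    (st : PySem.Dict String (List String) × List String × List String)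
    (e : List (String × String)) :
    PySem.Dict String (List String) × List String × List String :=
  match (PySem.Dict.ofList e).get? "check_id" with
  | none => st
  | some cid =>
    if cid = "" then st
    else if proposal_ids.contains cid then
      match prd.get? cid with
      | some r =>
        if r = "" then (st.1, st.2.1, st.2.2 ++ [cid])
        else (st.1.modify r [] (· ++ [cid]), st.2.1, st.2.2)
      | none => (st.1, st.2.1, st.2.2 ++ [cid])
    else (st.1, st.2.1 ++ [cid], st.2.2)

def build_mappings (proposal_id_to_rule : List (String × String)) (proposal_ids : List String) (existing_results : List (List (String × String))) : (List (String × List String)) × List String × List String :=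
  let prd := PySem.Dict.ofList proposal_id_to_rule
  let res := existing_results.foldl (buildStepA prd proposal_ids)
    (PySem.Dict.empty, [], [])
  (res.1.items, res.2.1, res.2.2)

-- ===== PORT B =====
-- truthy check_id of one existing result (None / "" are falsy)
def cidOf (e : List (String × String)) : Option String :=
  match (PySem.Dict.ofList e).get? "check_id" with
  | none => none
  | some c => if c = "" then none else some c

def mappedPair (prd : PySem.Dict String String) (c : String) : Option (String × String) :=
  match prd.get? c with
  | none => none
  | some r => if r = "" then none else some (r, c)

def build_mappings_alt (proposal_id_to_rule : List (String × String)) (proposal_ids : List String) (existing_results : List (List (String × String))) : (List (String × List String)) × List String × List String :=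
  let prd := PySem.Dict.ofList proposal_id_to_rule
  let cids := existing_results.filterMap cidOf
  let unmapped := cids.filter (fun c => !proposal_ids.contains c)
  let inprop := cids.filter (fun c => proposal_ids.contains c)
  let ponly := inprop.filter (fun c => (mappedPair prd c).isNone)
  let grouped := (inprop.filterMap (mappedPair prd)).foldl
    (fun d p => d.modify p.1 [] (· ++ [p.2])) PySem.Dict.empty
  (grouped.items, unmapped, ponly)

-- ===== PRECONDITION & SPEC =====
def Spec_build_mappings (proposal_id_to_rule : List (String × String)) (proposal_ids : List String) (existing_results : List (List (String × String))) (out : (List (String × List String)) × List String × List String) : Prop := out = build_mappings_alt proposal_id_to_rule proposal_ids existing_results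
instance (proposal_id_to_rule : List (String × String)) (proposal_ids : List String) (existing_results : List (List (String × String))) (out : (List (String × List String)) × List String × List String) : Decidable (Spec_build_mappings proposal_id_to_rule proposal_ids existing_results out) := by unfold Spec_build_mappings; infer_instance

-- ===== CLAIM (what is proved, stated in full; the proofs are below) =====
def Claim_equal_build_mappings : Prop := ∀ (proposal_id_to_rule : List (String × String)) (proposal_ids : List String) (existing_results : List (List (String × String))), Dom_build_mappings proposal_id_to_rule proposal_ids existing_results → Spec_build_mappings proposal_id_to_rule proposal_ids existing_results (build_mappings proposal_id_to_rule proposal_ids existing_results)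

-- ===== LEMMAS AND PROOFS =====

-- step lemmas: buildStepA expressed through B's helpers cidOf / mappedPair
theorem stepA_none (prd : PySem.Dict String String) (pids : List String)
    (st : PySem.Dict String (List String) × List String × List String)
    (e : List (String × String)) (h : cidOf e = none) :
    buildStepA prd pids st e = st := by
  unfold buildStepA
  unfold cidOf at h
  cases hg : (PySem.Dict.ofList e).get? "check_id" with
  | none => rfl
  | some c =>
    rw [hg] at h
    by_cases hc : c = ""
    · simp [hc]
    · simp [hc] at h

theorem stepA_some (prd : PySem.Dict String String) (pids : List String)
    (st : PySem.Dict String (List String) × List String × List String)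
    (e : List (String × String)) (cid : String) (h : cidOf e = some cid) :
    buildStepA prd pids st e =
      (if cid ∈ pids then
        match mappedPair prd cid with
        | some q => (st.1.modify q.1 [] (· ++ [q.2]), st.2.1, st.2.2)
        | none => (st.1, st.2.1, st.2.2 ++ [cid])
      else (st.1, st.2.1 ++ [cid], st.2.2)) := by
  unfold buildStepA
  unfold cidOf at h
  cases hg : (PySem.Dict.ofList e).get? "check_id" with
  | none => rw [hg] at h; exact absurd h (by simp)
  | some c =>
    rw [hg] at h
    by_cases hc : c = ""
    · simp [hc] at h
    · simp only [hc, if_neg hc, ite_false, Option.some.injEq] at h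
      subst h
      simp only [if_neg hc]
      unfold mappedPair
      by_cases hm : c ∈ pids
      · cases hr : prd.get? c with
        | none => simp [hm, hr]
        | some r =>
          by_cases hre : r = ""
          · simp [hm, hr, hre]
          · simp [hm, hr, hre]
      · simp [hm]

-- main invariant: A's loop from any state equals B's per-output passes appended to it
theorem loop_invariant (prd : PySem.Dict String String) (pids : List String)
    (ers : List (List (String × String)))
    (d : PySem.Dict String (List String)) (u p : List String) :
    ers.foldl (buildStepA prd pids) (d, u, p) =
      (((ers.filterMap cidOf).filter (fun c => pids.contains c)
          |>.filterMap (mappedPair prd)).foldl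
          (fun d q => d.modify q.1 [] (· ++ [q.2])) d,
       u ++ (ers.filterMap cidOf).filter (fun c => !pids.contains c),
       p ++ ((ers.filterMap cidOf).filter (fun c => pids.contains c)).filter
              (fun c => (mappedPair prd c).isNone)) := by
  induction ers generalizing d u p with
  | nil => simp
  | cons e rest ih =>
    simp only [List.foldl_cons, List.filterMap_cons]
    cases hcid : cidOf e with
    | none => rw [stepA_none prd pids _ e hcid]; simpa using ih d u p
    | some cid =>
      rw [stepA_some prd pids _ e cid hcid]
      by_cases hm : cid ∈ pids
      · cases hq : mappedPair prd cid with
        | none => simp [hm, hq, ih]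
        | some q => simp [hm, hq, ih]
      · simp [hm, ih]

-- ===== VERDICT (by name: the statement is the Claim_ definition above) =====
theorem build_mappings_spec : Claim_equal_build_mappings := by
  intro pr pids ers _
  unfold Spec_build_mappings
  simp only [build_mappings, build_mappings_alt]
  rw [loop_invariant]
  simp
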